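-- pv_equiv track=rewrite | github.com/cmbenello/141-discussion-final | solutions/conditionals_loops_sols.py | cl_02_product_multiples_range
-- ===== SOURCE A (Python) =====
-- def cl_02_product_multiples_range(a: int, b: int, k: int) -> int:
--     """
--     Category: Conditionals/Loops
--     Difficulty: Easy
--     Args:
--         a (int): Start of the range.
--         b (int): End of the range.
--         k (int): Multiple factor.
--     Returns:
--         int: Product of all numbers between a and b inclusive that are multiples of k.
--              Returns 1 if no such numbers exist.
--     Examples:
--         >>> cl_02_product_multiples_range(1, 10, 3)
--         18
--         >>> cl_02_product_multiples_range(5, 7, 10)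
--         1
--     """
--     if k == 0:
--         raise ValueError("k must be non-zero")
--
--     start, end = (a, b) if a <= b else (b, a)
--     product = 1
--     for num in range(start, end + 1):
--         if num % k == 0:
--             product *= num
--     return product
-- ===== SOURCE B (Python) =====
-- def cl_02_product_multiples_range(a: int, b: int, k: int) -> int:
--     if k == 0:
--         raise ValueError("k must be non-zero")
--
--     start, end = (a, b) if a <= b else (b, a)
--     kk = abs(k)
--     lo = -(-start // kk)   # smallest quotient m with m*kk >= start
--     hi = end // kk         # largest quotient m with m*kk <= end
--     n = hi - lo + 1        # number of multiples of k in [start, end]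
--     if n <= 0:
--         return 1
--     product = 1
--     for m in range(lo, hi + 1):
--         product *= m
--     return product * kk ** n
-- ===== Notes on version B (the rewrite author's own statement) =====
-- stated objective: alternative
-- what changed: Instead of scanning every integer in [start,end] and testing num % k == 0, B computes the quotient bounds lo = ceil(start/|k|) and hi = floor(end/|k|), multiplies the quotients lo..hi and factors out |k|^n, so only the multiples' quotients are traversed.
import Mathlib
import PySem

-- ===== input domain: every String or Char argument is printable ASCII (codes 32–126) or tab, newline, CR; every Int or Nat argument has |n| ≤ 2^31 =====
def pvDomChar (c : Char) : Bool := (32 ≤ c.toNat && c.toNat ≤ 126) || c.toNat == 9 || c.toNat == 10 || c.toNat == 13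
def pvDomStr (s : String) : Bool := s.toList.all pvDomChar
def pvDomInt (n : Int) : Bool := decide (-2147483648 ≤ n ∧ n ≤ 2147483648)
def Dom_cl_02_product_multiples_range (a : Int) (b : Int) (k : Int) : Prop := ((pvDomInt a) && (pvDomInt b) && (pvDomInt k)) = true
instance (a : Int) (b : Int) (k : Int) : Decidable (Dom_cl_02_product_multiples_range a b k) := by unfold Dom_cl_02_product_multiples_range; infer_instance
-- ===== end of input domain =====

-- B replaces the scan of every integer in [start,end] with a product over the quotient
-- range [ceil(start/|k|), floor(end/|k|)] times |k|^n (alternative decomposition, same task).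
-- A raises ValueError on k = 0 (so does B); Pre_ excludes exactly k = 0.


-- ===== PORT A =====
def cl_02_product_multiples_range (a : Int) (b : Int) (k : Int) : Int :=
  if k = 0 then 0  -- Python: raise ValueError (excluded by Pre_)
  else
    let start := if a ≤ b then a else b
    let stop := if a ≤ b then b else a
    (PySem.List.pyRange start (stop + 1) 1).foldl
      (fun product num => if PySem.Int.mod num k = 0 then product * num else product) 1

-- ===== PORT B =====
def cl_02_product_multiples_range_alt (a : Int) (b : Int) (k : Int) : Int :=
  if k = 0 then 0  -- Python: raise ValueError (excluded by Pre_)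
  else
    let start := if a ≤ b then a else b
    let stop := if a ≤ b then b else a
    let kk := |k|
    let lo := -(PySem.Int.floordiv (-start) kk)
    let hi := PySem.Int.floordiv stop kk
    let n := hi - lo + 1
    if n ≤ 0 then 1
    else ((PySem.List.pyRange lo (hi + 1) 1).foldl (fun product m => product * m) 1) * kk ^ n.toNat

-- ===== PRECONDITION & SPEC =====
-- Pre_ excludes exactly k = 0, where both Pythons raise ValueError.
def Pre_cl_02_product_multiples_range (a : Int) (b : Int) (k : Int) : Prop := k ≠ 0
instance (a : Int) (b : Int) (k : Int) : Decidable (Pre_cl_02_product_multiples_range a b k) := by unfold Pre_cl_02_product_multiples_range; infer_instance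
def pvWitness_cl_02_product_multiples_range : Int × Int × Int := (1, 10, 3)

def Spec_cl_02_product_multiples_range (a : Int) (b : Int) (k : Int) (out : Int) : Prop := out = cl_02_product_multiples_range_alt a b k
instance (a : Int) (b : Int) (k : Int) (out : Int) : Decidable (Spec_cl_02_product_multiples_range a b k out) := by unfold Spec_cl_02_product_multiples_range; infer_instance

-- ===== CLAIM (what is proved, stated in full; the proofs are below) =====
def Claim_equal_cl_02_product_multiples_range : Prop := ∀ (a : Int) (b : Int) (k : Int), Dom_cl_02_product_multiples_range a b k → Pre_cl_02_product_multiples_range a b k → Spec_cl_02_product_multiples_range a b k (cl_02_product_multiples_range a b k)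

-- ===== LEMMAS AND PROOFS =====

-- A's loop shape: conditional multiply-fold = product of the filtered list.
theorem foldl_ite_mul_eq_filter_prod (c : Int → Prop) [DecidablePred c] (l : List Int) (acc : Int) :
    l.foldl (fun p x => if c x then p * x else p) acc = acc * (l.filter (fun x => decide (c x))).prod := by
  induction l generalizing acc with
  | nil => simp
  | cons y ys ih =>
    by_cases h : c y <;> simp [h, ih, mul_assoc]

-- B's loop shape: plain multiply-fold = product.
theorem foldl_mul_eq_prod (l : List Int) (acc : Int) :
    l.foldl (fun p x => p * x) acc = acc * l.prod := by
  induction l generalizing acc with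
  | nil => simp
  | cons y ys ih => simp [ih, mul_assoc]

-- The multiples of kk in [s, e] are exactly (· * kk) of the quotient range [lo, hi].
theorem filter_dvd_pyRange_eq_map (s e kk lo hi : Int) (hkk : 0 < kk)
    (hlo : (lo - 1) * kk < s ∧ s ≤ lo * kk) (hhi : hi * kk ≤ e ∧ e < (hi + 1) * kk) :
    (PySem.List.pyRange s (e + 1) 1).filter (fun x => decide (kk ∣ x))
      = (PySem.List.pyRange lo (hi + 1) 1).map (fun m => m * kk) := by
  have h1 : ((PySem.List.pyRange s (e + 1) 1).filter (fun x => decide (kk ∣ x))).Pairwise (· < ·) :=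
    (PySem.List.pairwise_lt_pyRange_one s (e + 1)).filter _
  have h2 : ((PySem.List.pyRange lo (hi + 1) 1).map (fun m => m * kk)).Pairwise (· < ·) := by
    refine List.Pairwise.map _ (fun x y hxy => ?_) (PySem.List.pairwise_lt_pyRange_one lo (hi + 1))
    exact mul_lt_mul_of_pos_right hxy hkk
  have hmem : ∀ x, x ∈ (PySem.List.pyRange s (e + 1) 1).filter (fun x => decide (kk ∣ x))
      ↔ x ∈ (PySem.List.pyRange lo (hi + 1) 1).map (fun m => m * kk) := by
    intro x
    simp only [List.mem_filter, List.mem_map, PySem.List.mem_pyRange_one, decide_eq_true_eq]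
    constructor
    · rintro ⟨⟨hsx, hxe⟩, c, rfl⟩
      refine ⟨c, ⟨?_, ?_⟩, (mul_comm c kk)⟩
      · -- lo ≤ c : from (lo-1)*kk < s ≤ kk*c
        by_contra hc
        push Not at hc
        have : kk * c ≤ (lo - 1) * kk := by nlinarith
        omega
      · -- c < hi + 1 : from kk*c ≤ e < (hi+1)*kk
        by_contra hc
        push Not at hc
        have : (hi + 1) * kk ≤ kk * c := by nlinarith
        omega
    · rintro ⟨m, ⟨hlm, hmh⟩, rfl⟩
      refine ⟨⟨?_, ?_⟩, m, mul_comm m kk⟩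
      · have : lo * kk ≤ m * kk := mul_le_mul_of_nonneg_right hlm hkk.le
        omega
      · have : m * kk ≤ hi * kk := mul_le_mul_of_nonneg_right (by omega) hkk.le
        omega
  have hp := (List.perm_ext_iff_of_nodup h1.nodup h2.nodup).mpr hmem
  exact hp.eq_of_pairwise (fun a b _ _ hab hba => le_antisymm hab.le hba.le) h1 h2

-- Product of (· * kk) over a list factors as prod * kk ^ length.
theorem prod_map_mul_const (l : List Int) (kk : Int) :
    (l.map (fun m => m * kk)).prod = l.prod * kk ^ l.length := by
  induction l with
  | nil => simp
  | cons y ys ih => simp [ih]; ring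

-- ===== VERDICT (by name: the statement is the Claim_ definition above) =====
theorem cl_02_product_multiples_range_spec : Claim_equal_cl_02_product_multiples_range := by
  intro a b k _ hk
  unfold Spec_cl_02_product_multiples_range cl_02_product_multiples_range cl_02_product_multiples_range_alt
  simp only [if_neg hk]
  set s := if a ≤ b then a else b with hs
  set e := if a ≤ b then b else a with he
  set kk := |k| with hkk
  have hkpos : 0 < kk := abs_pos.mpr hk
  set lo := -(PySem.Int.floordiv (-s) kk) with hlo
  set hi := PySem.Int.floordiv e kk with hhi
  have hloB : (lo - 1) * kk < s ∧ s ≤ lo * kk :=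
    (PySem.Int.neg_floordiv_neg_eq_iff_of_pos hkpos).mp rfl
  have hhiB : hi * kk ≤ e ∧ e < (hi + 1) * kk :=
    (PySem.Int.floordiv_eq_iff_of_pos hkpos).mp rfl
  have hmodiff : ∀ (p num : Int),
      (if PySem.Int.mod num k = 0 then p * num else p) = (if kk ∣ num then p * num else p) := by
    intro p num
    have : PySem.Int.mod num k = 0 ↔ kk ∣ num := by
      rw [PySem.Int.mod_eq_zero_iff_dvd]
      exact ⟨fun h => (abs_dvd k num).mpr h, fun h => (abs_dvd k num).mp h⟩
    simp [this]
  have hA : (PySem.List.pyRange s (e + 1) 1).foldl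
      (fun product num => if PySem.Int.mod num k = 0 then product * num else product) 1
      = ((PySem.List.pyRange lo (hi + 1) 1).map (fun m => m * kk)).prod := by
    rw [show (fun (product num : Int) => if PySem.Int.mod num k = 0 then product * num else product)
          = (fun product num => if kk ∣ num then product * num else product) from
        funext fun p => funext fun n => hmodiff p n]
    rw [foldl_ite_mul_eq_filter_prod, filter_dvd_pyRange_eq_map s e kk lo hi hkpos hloB hhiB, one_mul]
  rw [hA]
  by_cases hn : hi - lo + 1 ≤ 0
  · -- empty quotient range on both sides
    rw [if_pos hn, PySem.List.pyRange_one_eq_nil (by omega)]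
    simp
  · rw [if_neg hn, prod_map_mul_const, foldl_mul_eq_prod, PySem.List.length_pyRange_one]
    have : (hi + 1 - lo).toNat = (hi - lo + 1).toNat := by omega
    rw [this]; ring
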